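-- pv_equiv track=rewrite | github.com/hdurrani1107/DBS_repo | HW7/wedding_examples/wedding35.py | panel
-- ===== SOURCE A (Python) =====
-- def panel(guests): #create panel function. Note not required part of assignment but used later
--   N_guests = len(guests) #number of guests in string
--   if N_guests <= 0: # if 0 guests, return empty string
--     return [""]
--   if N_guests == 1: # if only one guest, return guest
--     return [guests]
--   if N_guests == 2: # if two guests return guests and guests in opposite order
--     return [guests, guests[::-1]]
--   start_map = []  # code continues here if nothing returned yet, so for more than 2 guests
--   start_map.append(guests[0]) #create a start map that appends the 1 guest and 2 guest solutions
--   start_map.append([guests[0:2], (guests[1] + guests[0])])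
--   for tmp_guest_num in range(2,N_guests): #for each additional number past two guests, go through the following
--     start_map.append([]) #append an empty array as a place holder
--     for num_to_append in range(0,len(start_map[tmp_guest_num-1])): #case of n-1 with last guest appended on end
--       start_map[tmp_guest_num].append(start_map[tmp_guest_num-1][num_to_append] + guests[tmp_guest_num])
--     for num_to_append in range(0,len(start_map[tmp_guest_num-2])): #case of n-2 with last two guests switched spots
--       start_map[tmp_guest_num].append(start_map[tmp_guest_num-2][num_to_append] + guests[tmp_guest_num] + guests[tmp_guest_num-1])
--   val = start_map[-1] #return last value in map
--   return val
-- ===== SOURCE B (Python) =====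
-- def panel(guests):
--     # Enumerate the compositions of len(guests) into parts 1 and 2 by DFS
--     # (choosing the LAST part first, part 1 before part 2), rendering each
--     # composition directly to its arrangement string; no table of prefix
--     # solutions is ever built.
--     out = []
--
--     def go(rem, rev_parts):
--         if rem == 0:
--             s = []
--             i = 0
--             for p in reversed(rev_parts):
--                 if p == 1:
--                     s.append(guests[i])
--                     i += 1
--                 else:
--                     s.append(guests[i + 1])
--                     s.append(guests[i])
--                     i += 2
--             out.append("".join(s))
--             return
--         go(rem - 1, rev_parts + [1])
--         if rem >= 2:
--             go(rem - 2, rev_parts + [2])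
--
--     go(len(guests), [])
--     return out
-- ===== Notes on version B (the rewrite author's own statement) =====
-- stated objective: alternative
-- what changed: Replaced A's bottom-up table of all prefix arrangement lists by a DFS that enumerates compositions of n into parts 1 and 2 (last part chosen first, 1 before 2) and renders each composition directly to its swap string, so no intermediate arrangement lists exist.
import Mathlib
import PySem

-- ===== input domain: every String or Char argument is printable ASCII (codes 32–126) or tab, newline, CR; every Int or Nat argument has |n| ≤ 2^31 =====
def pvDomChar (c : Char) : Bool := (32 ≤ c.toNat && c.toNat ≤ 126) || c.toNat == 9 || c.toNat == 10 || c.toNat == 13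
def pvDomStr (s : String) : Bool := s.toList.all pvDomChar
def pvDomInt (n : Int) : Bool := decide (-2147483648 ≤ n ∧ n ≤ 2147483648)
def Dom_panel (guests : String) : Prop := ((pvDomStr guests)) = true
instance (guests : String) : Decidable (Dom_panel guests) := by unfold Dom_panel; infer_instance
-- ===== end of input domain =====

-- B replaces A's bottom-up table of all prefix arrangement lists by a DFS over the
-- compositions of n into parts 1 and 2 (last part first, 1 before 2), rendering each
-- composition directly to its arrangement string: an alternative algorithm, same cost.

-- ===== PORT A =====
-- One iteration of A's outer loop at index k: append placeholder entry, then the two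
-- indexed inner loops that append into it (the entry is built locally, then appended —
-- same resulting list value as mutating the placeholder in place).
def panelStepA (cs : List Char) (t : List (List String)) (k : Nat) : List (List String) :=
  let e1 := (List.range (t.getD (k-1) []).length).foldl
      (fun acc i => acc ++ [((t.getD (k-1) []).getD i "") ++ String.ofList [cs.getD k ' ']]) []
  let e2 := (List.range (t.getD (k-2) []).length).foldl
      (fun acc i => acc ++ [((t.getD (k-2) []).getD i "") ++ String.ofList [cs.getD k ' ', cs.getD (k-1) ' ']]) e1
  t ++ [e2]

def panel (guests : String) : List String :=
  let cs := guests.toList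
  let n := cs.length
  if n ≤ 0 then [""]
  else if n = 1 then [guests]
  else if n = 2 then [guests, String.ofList cs.reverse]   -- guests[::-1] (PySem.Str.slice?_none_none_neg_one)
  else
    let t0 : List (List String) :=
      [[String.ofList [cs.getD 0 ' ']],
       [String.ofList (PySem.List.slice cs (some 0) (some 2)), String.ofList [cs.getD 1 ' ', cs.getD 0 ' ']]]
    let t := (List.range' 2 (n-2)).foldl (panelStepA cs) t0
    PySem.List.pyGetD t (-1) []        -- start_map[-1]

-- ===== PORT B =====
-- Source B's renderer: walk the parts (the reversed choice list) keeping the position i,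
-- collecting characters, then join.
def renderB (cs : List Char) (parts : List Nat) : String :=
  String.ofList ((parts.foldl (fun (st : Nat × List Char) p =>
    if p = 1 then (st.1 + 1, st.2 ++ [cs.getD st.1 ' '])
    else (st.1 + 2, st.2 ++ [cs.getD (st.1 + 1) ' ', cs.getD st.1 ' '])) (0, ([] : List Char))).2)

-- Source B's DFS go(rem, rev_parts): part 1 first, part 2 only when rem ≥ 2; at rem = 0
-- render the reversed choice list and emit (appends to out = list concatenation).
def goB (cs : List Char) : Nat → List Nat → List String
  | 0, rev => [renderB cs rev.reverse]
  | 1, rev => goB cs 0 (rev ++ [1])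
  | (r+2), rev => goB cs (r+1) (rev ++ [1]) ++ goB cs r (rev ++ [2])

def panel_alt (guests : String) : List String :=
  goB guests.toList guests.toList.length []

-- ===== PRECONDITION & SPEC =====
def Spec_panel (guests : String) (out : List String) : Prop := out = panel_alt guests
instance (guests : String) (out : List String) : Decidable (Spec_panel guests out) := by unfold Spec_panel; infer_instance

-- ===== CLAIM (what is proved, stated in full; the proofs are below) =====
def Claim_equal_panel : Prop := ∀ (guests : String), Dom_panel guests → Spec_panel guests (panel guests)

-- ===== LEMMAS AND PROOFS =====

-- The common specification: Tf cs k = the arrangement list for the first k characters,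
-- in the Fibonacci-recurrence order.
def Tf (cs : List Char) : Nat → List String
  | 0 => [""]
  | 1 => [String.ofList [cs.getD 0 ' ']]
  | (k+2) => (Tf cs (k+1)).map (· ++ String.ofList [cs.getD (k+1) ' '])
             ++ (Tf cs k).map (· ++ String.ofList [cs.getD (k+1) ' ', cs.getD k ' '])

-- A's indexed append loop over a list is that list mapped, appended to the accumulator.
lemma foldl_range_append_map (xs : List String) (f : String → String) (acc : List String) :
    (List.range xs.length).foldl (fun a i => a ++ [f (xs.getD i "")]) acc = acc ++ xs.map f := by
  induction xs using List.reverseRecOn generalizing acc with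
  | nil => simp
  | append_singleton ys y ih =>
    rw [List.length_append, List.length_singleton, List.range_succ, List.foldl_append]
    rw [PySem.List.foldl_congr_mem _ _ (fun a i => a ++ [f (ys.getD i "")]) acc
        (by intro a i hi
            have hlt : i < ys.length := List.mem_range.mp hi
            simp [List.getD_eq_getElem?_getD, List.getElem?_append_left hlt])]
    rw [ih]
    simp [List.getD_eq_getElem?_getD]

lemma getD_append_eq {α : Type} (l : List α) (x : α) (d : α) (n : Nat) (h : n = l.length) :
    (l ++ [x]).getD n d = x := by
  subst h; simp [List.getD_eq_getElem?_getD]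

lemma getD_of_lt {α : Type} (l l' : List α) (n : Nat) (d : α) (h : n < l.length) :
    (l ++ l').getD n d = l.getD n d := by
  simp [List.getD_eq_getElem?_getD, List.getElem?_append_left h]

-- Invariant: after m outer iterations, A's table has m+2 entries and its entries at
-- indices m and m+1 are Tf (m+1) and Tf (m+2).
lemma table_inv (cs : List Char)
    (h1 : Tf cs 2 = [String.ofList (PySem.List.slice cs (some 0) (some 2)),
                     String.ofList [cs.getD 1 ' ', cs.getD 0 ' ']]) :
    ∀ m : Nat,
      ((List.range' 2 m).foldl (panelStepA cs)
          [[String.ofList [cs.getD 0 ' ']],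
           [String.ofList (PySem.List.slice cs (some 0) (some 2)),
            String.ofList [cs.getD 1 ' ', cs.getD 0 ' ']]]).length = m + 2 ∧
      ((List.range' 2 m).foldl (panelStepA cs)
          [[String.ofList [cs.getD 0 ' ']],
           [String.ofList (PySem.List.slice cs (some 0) (some 2)),
            String.ofList [cs.getD 1 ' ', cs.getD 0 ' ']]]).getD m [] = Tf cs (m+1) ∧
      ((List.range' 2 m).foldl (panelStepA cs)
          [[String.ofList [cs.getD 0 ' ']],
           [String.ofList (PySem.List.slice cs (some 0) (some 2)),
            String.ofList [cs.getD 1 ' ', cs.getD 0 ' ']]]).getD (m+1) [] = Tf cs (m+2) := by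
  intro m
  induction m with
  | zero => exact ⟨rfl, rfl, h1.symm⟩
  | succ m ih =>
    obtain ⟨hlen, hm1, hm2⟩ := ih
    rw [List.range'_1_concat, List.foldl_append]
    set t := (List.range' 2 m).foldl (panelStepA cs) _ with ht
    simp only [List.foldl_cons, List.foldl_nil]
    have hk1 : 2 + m - 1 = m + 1 := by omega
    have hk2 : 2 + m - 2 = m := by omega
    unfold panelStepA
    rw [hk1, hk2, hm1, hm2]
    refine ⟨by simp [hlen], ?_, ?_⟩
    · rw [getD_of_lt _ _ _ _ (by omega)]
      exact hm2
    · simp only []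
      rw [foldl_range_append_map (Tf cs (m+2)) (fun s => s ++ String.ofList [cs.getD (2+m) ' ']) [],
          foldl_range_append_map (Tf cs (m+1)) (fun s => s ++ String.ofList [cs.getD (2+m) ' ', cs.getD (m+1) ' '])]
      rw [getD_append_eq _ _ _ _ (by omega)]
      have h2m : 2 + m = m + 2 := by omega
      rw [h2m]
      show [] ++ _ ++ _ = Tf cs (m+1+2)
      rw [show Tf cs (m+1+2) = (Tf cs (m+2)).map (· ++ String.ofList [cs.getD (m+2) ' '])
             ++ (Tf cs (m+1)).map (· ++ String.ofList [cs.getD (m+2) ' ', cs.getD (m+1) ' ']) from rfl]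
      simp

-- B side: rendered characters of a part list starting at position i.
def chunk (cs : List Char) : Nat → List Nat → List Char
  | _, [] => []
  | i, p :: ps => if p = 1 then cs.getD i ' ' :: chunk cs (i+1) ps
                  else cs.getD (i+1) ' ' :: cs.getD i ' ' :: chunk cs (i+2) ps

lemma chunk_cons1 (cs : List Char) (i : Nat) (ps : List Nat) :
    chunk cs i (1 :: ps) = cs.getD i ' ' :: chunk cs (i+1) ps := by simp [chunk]

lemma chunk_cons2 (cs : List Char) (i : Nat) (ps : List Nat) :
    chunk cs i (2 :: ps) = cs.getD (i+1) ' ' :: cs.getD i ' ' :: chunk cs (i+2) ps := by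
  simp [chunk]

def partWeight (ps : List Nat) : Nat := (ps.map (fun p => if p = 1 then 1 else 2)).sum

lemma render_fold_eq (cs : List Char) :
    ∀ (ps : List Nat) (i : Nat) (acc : List Char),
      ps.foldl (fun (st : Nat × List Char) p =>
        if p = 1 then (st.1 + 1, st.2 ++ [cs.getD st.1 ' '])
        else (st.1 + 2, st.2 ++ [cs.getD (st.1 + 1) ' ', cs.getD st.1 ' '])) (i, acc)
      = (i + partWeight ps, acc ++ chunk cs i ps) := by
  intro ps
  induction ps with
  | nil => intro i acc; simp [partWeight, chunk]
  | cons p ps ih =>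
    intro i acc
    rw [List.foldl_cons]
    by_cases hp : p = 1
    · simp only [hp, reduceIte]
      rw [ih]
      refine Prod.ext ?_ ?_ <;> simp [partWeight, chunk] <;> omega
    · simp only [if_neg hp]
      rw [ih]
      refine Prod.ext ?_ ?_ <;> simp [partWeight, chunk, hp] <;> omega

lemma renderB_eq_chunk (cs : List Char) (ps : List Nat) :
    renderB cs ps = String.ofList (chunk cs 0 ps) := by
  unfold renderB
  rw [render_fold_eq]
  simp

lemma ofList_append_str (l l' : List Char) :
    String.ofList l ++ String.ofList l' = String.ofList (l ++ l') := by
  apply String.toList_injective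
  simp

-- The DFS produces Tf rem, each entry suffixed by the rendering of the choices
-- already made (which cover positions rem and up).
lemma goB_eq_Tf (cs : List Char) :
    ∀ (rem : Nat) (rev : List Nat),
      goB cs rem rev = (Tf cs rem).map (· ++ String.ofList (chunk cs rem rev.reverse)) := by
  intro rem
  induction rem using Nat.strong_induction_on with
  | _ rem ih =>
    match rem with
    | 0 =>
      intro rev
      simp [goB, Tf, renderB_eq_chunk]
    | 1 =>
      intro rev
      rw [goB, ih 0 (by omega)]
      simp only [List.reverse_append, List.reverse_cons, List.reverse_nil, List.nil_append,
        List.cons_append, chunk_cons1]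
      show [("" : String) ++ _] = (Tf cs 1).map _
      rw [show Tf cs 1 = [String.ofList [cs.getD 0 ' ']] from rfl]
      simp [ofList_append_str]
    | (r+2) =>
      intro rev
      rw [goB, ih (r+1) (by omega), ih r (by omega)]
      simp only [List.reverse_append, List.reverse_cons, List.reverse_nil, List.nil_append,
        List.cons_append, chunk_cons1, chunk_cons2]
      rw [show Tf cs (r+2) = (Tf cs (r+1)).map (· ++ String.ofList [cs.getD (r+1) ' '])
             ++ (Tf cs r).map (· ++ String.ofList [cs.getD (r+1) ' ', cs.getD r ' ']) from rfl]
      rw [List.map_append, List.map_map, List.map_map]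
      congr 1 <;>
      · apply List.map_congr_left
        intro s _
        simp [Function.comp, String.append_assoc, ofList_append_str]

lemma panel_alt_eq_Tf (guests : String) : panel_alt guests = Tf guests.toList guests.toList.length := by
  unfold panel_alt
  rw [goB_eq_Tf]
  simp [chunk, show String.ofList ([] : List Char) = "" from rfl]

-- ===== VERDICT =====
theorem panel_spec : Claim_equal_panel := by
  intro guests _
  unfold Spec_panel
  rw [panel_alt_eq_Tf]
  unfold panel
  set cs := guests.toList with hcs
  by_cases h0 : cs.length ≤ 0
  · have : cs.length = 0 := by omega
    simp [this, Tf]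
  · by_cases h1 : cs.length = 1
    · rw [if_neg h0, if_pos h1, h1]
      obtain ⟨a, h⟩ : ∃ a, cs = [a] := by
        match cs, h1 with
        | [a], _ => exact ⟨a, rfl⟩
      have hg : guests = String.ofList [a] := by
        rw [← h, hcs]; exact String.ofList_toList.symm
      rw [h]
      simp [Tf, hg]
    · by_cases h2 : cs.length = 2
      · rw [if_neg h0, if_neg h1, if_pos h2, h2]
        obtain ⟨a, b, h⟩ : ∃ a b, cs = [a, b] := by
          match cs, h2 with
          | [a, b], _ => exact ⟨a, b, rfl⟩
        have hg : guests = String.ofList [a, b] := by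
          rw [← h, hcs]; exact String.ofList_toList.symm
        rw [h]
        simp [Tf, hg, ofList_append_str]
      · have hn3 : 3 ≤ cs.length := by omega
        rw [if_neg h0, if_neg h1, if_neg h2]
        have hslice : String.ofList (PySem.List.slice cs (some 0) (some 2))
            = String.ofList [cs.getD 0 ' '] ++ String.ofList [cs.getD 1 ' '] := by
          obtain ⟨a, b, rest, h⟩ : ∃ a b rest, cs = a :: b :: rest := by
            match cs, hn3 with
            | a :: b :: rest, _ => exact ⟨a, b, rest, rfl⟩
          rw [h]
          simp [PySem.List.slice, PySem.List.clampIdx, ofList_append_str]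
        have hTf2 : Tf cs 2 = [String.ofList (PySem.List.slice cs (some 0) (some 2)),
                               String.ofList [cs.getD 1 ' ', cs.getD 0 ' ']] := by
          rw [hslice]
          simp [Tf, ofList_append_str]
        obtain ⟨hlen, _, hlast⟩ := table_inv cs hTf2 (cs.length - 2)
        set t := (List.range' 2 (cs.length - 2)).foldl (panelStepA cs) _ with ht
        have hne : t ≠ [] := by
          intro hcon; rw [hcon] at hlen; simp at hlen
        rw [PySem.List.pyGetD_neg_one t [] hne]
        rw [List.getLast_eq_getElem]
        have hidx : cs.length - 2 + 1 = t.length - 1 := by omega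
        rw [← List.getD_eq_getElem t [] (by omega), ← hidx, hlast]
        congr 1
        omega
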